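-- pv_equiv track=rewrite | github.com/kamerlinlab/cadee | mutate/tools.py | get_ranges
-- ===== SOURCE A (Python) =====
-- def get_ranges(indexes):
--     """Form start-end list, made form indexes:
--     eg. indexes=[1,2,3,4,10,11]:
--         return [ [1,4], [10,11] ]
--     """
--
--     ## UNITTEST: in [2540, 2541, 2542, 2543, 2544, 2545, 2546, 2547, 2548, 2549, 7543, 7544, 7545, 7546, 7547, 7548, 7549, 7550, 7551, 7552, 7553, 7554, 7555, 7556, 7557]  # NOPEP8
--     ##           out: [[2540, 2549], [7543, 7557]]
--
--     ranges = []
--     previdx = None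
--     start = None
--     for idx in sorted(indexes):
--         idx = int(idx)
--         if previdx is None or previdx != idx-1:
--             if previdx is not None:
--                 ranges.append([start, previdx])
--             start = idx
--         previdx = idx
--
--     if start is not None:
--         ranges.append([start, idx])
--
--     return ranges
-- ===== SOURCE B (Python) =====
-- def get_ranges(indexes):
--     """Form start-end list, made from indexes."""
--     nums = sorted(int(x) for x in indexes)
--     if not nums:
--         return []
--     pairs = [(a, b) for a, b in zip(nums, nums[1:]) if b != a + 1]
--     starts = [nums[0]] + [b for a, b in pairs]
--     ends = [a for a, b in pairs] + [nums[-1]]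
--     return [[s, e] for s, e in zip(starts, ends)]
-- ===== Notes on version B (the rewrite author's own statement) =====
-- stated objective: idiomatic
-- what changed: A tracks running previdx/start state in one stateful loop; B sorts, computes the break pairs (adjacent elements not differing by 1) in one comprehension, and zips the starts list with the ends list.
import Mathlib
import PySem

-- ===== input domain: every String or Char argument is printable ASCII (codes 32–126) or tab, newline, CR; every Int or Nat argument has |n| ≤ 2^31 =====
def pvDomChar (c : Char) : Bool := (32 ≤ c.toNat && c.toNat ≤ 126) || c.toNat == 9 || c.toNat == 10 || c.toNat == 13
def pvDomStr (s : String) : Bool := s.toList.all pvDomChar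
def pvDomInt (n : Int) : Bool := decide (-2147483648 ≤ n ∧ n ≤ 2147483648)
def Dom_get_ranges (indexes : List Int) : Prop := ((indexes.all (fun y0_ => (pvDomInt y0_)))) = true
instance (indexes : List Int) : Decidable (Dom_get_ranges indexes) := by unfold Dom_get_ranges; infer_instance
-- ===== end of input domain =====

-- B replaces A's running previdx/start/ranges state by computing the break pairs once and
-- zipping starts with ends (objective: idiomatic/alternative decomposition; same O(n log n) cost).

-- ===== PORT A =====
-- one loop iteration of A: state = (ranges, previdx, start)
def aStep (st : List (List Int) × Option Int × Option Int) (idx : Int) :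
    List (List Int) × Option Int × Option Int :=
  let ranges := st.1
  let previdx := st.2.1
  let start := st.2.2
  if previdx = none ∨ previdx ≠ some (idx - 1) then
    -- `if previdx is not None: ranges.append([start, previdx])`; start/previdx are `some` there,
    -- so `.getD 0` reads exactly the stored values
    let ranges := if previdx ≠ none then ranges ++ [[start.getD 0, previdx.getD 0]] else ranges
    (ranges, some idx, some idx)
  else
    (ranges, some idx, start)

def get_ranges (indexes : List Int) : List (List Int) :=
  let fin := (PySem.List.sorted indexes (fun x => x) false).foldl aStep ([], none, none)
  -- `if start is not None: ranges.append([start, idx])`; at loop end previdx = idx, both `some`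
  match fin.2.2 with
  | some s => fin.1 ++ [[s, fin.2.1.getD 0]]
  | none => fin.1

-- ===== PORT B =====
def get_ranges_alt (indexes : List Int) : List (List Int) :=
  let nums := PySem.List.sorted (indexes.map (fun x => x)) (fun x => x) false  -- sorted(int(x) for x in indexes); int(x) = x on Int
  if nums = [] then []
  else
    let pairs := (nums.zip (PySem.List.slice nums (some 1) none)).filter (fun p => p.2 ≠ p.1 + 1)
    -- nums[0] / nums[-1]: indices in range since nums ≠ []
    let starts := [(PySem.List.pyGet? nums 0).getD 0] ++ pairs.map (·.2)
    let ends := pairs.map (·.1) ++ [(PySem.List.pyGet? nums (-1)).getD 0]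
    (starts.zip ends).map (fun p => [p.1, p.2])

-- ===== PRECONDITION & SPEC =====
def Spec_get_ranges (indexes : List Int) (out : List (List Int)) : Prop := out = get_ranges_alt indexes
instance (indexes : List Int) (out : List (List Int)) : Decidable (Spec_get_ranges indexes out) := by unfold Spec_get_ranges; infer_instance

-- ===== CLAIM (what is proved, stated in full; the proofs are below) =====
def Claim_equal_get_ranges : Prop := ∀ (indexes : List Int), Dom_get_ranges indexes → Spec_get_ranges indexes (get_ranges indexes)

-- ===== LEMMAS AND PROOFS =====

-- canonical recursive form of the grouping of a sorted list into runs
def goRun (s p : Int) : List Int → List (List Int)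
  | [] => [[s, p]]
  | y :: ys => if p = y - 1 then goRun s y ys else [s, p] :: goRun y y ys

-- B's zip result, stated recursively over the break pairs
def mkR (s : Int) : List (Int × Int) → Int → List (List Int)
  | [], last => [[s, last]]
  | (a, b) :: P, last => [s, a] :: mkR b P last

def pairsF (l : List Int) : List (Int × Int) :=
  (l.zip l.tail).filter (fun p => p.2 ≠ p.1 + 1)

lemma aFold_eq_goRun (l : List Int) (ranges : List (List Int)) (p s : Int) :
    (match (l.foldl aStep (ranges, some p, some s)).2.2 with
      | some s' => (l.foldl aStep (ranges, some p, some s)).1 ++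
          [[s', ((l.foldl aStep (ranges, some p, some s)).2.1).getD 0]]
      | none => (l.foldl aStep (ranges, some p, some s)).1)
    = ranges ++ goRun s p l := by
  induction l generalizing ranges p s with
  | nil => simp [goRun]
  | cons y ys ih =>
    by_cases h : p = y - 1
    · have hstep : aStep (ranges, some p, some s) y = (ranges, some y, some s) := by
        simp [aStep, h]
      simp only [List.foldl_cons, hstep, ih, goRun, if_pos h]
    · have hstep : aStep (ranges, some p, some s) y
          = (ranges ++ [[s, p]], some y, some y) := by
        simp [aStep, h]
      simp only [List.foldl_cons, hstep, ih, goRun, if_neg h, List.append_assoc,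
        List.singleton_append]

lemma zip_mkR (s : Int) (P : List (Int × Int)) (last : Int) :
    ((s :: P.map (·.2)).zip (P.map (·.1) ++ [last])).map (fun p => [p.1, p.2])
      = mkR s P last := by
  induction P generalizing s with
  | nil => simp [mkR]
  | cons ab P ih =>
    obtain ⟨a, b⟩ := ab
    simp only [List.map_cons, List.cons_append, List.zip_cons_cons, List.map_cons, mkR]
    exact congrArg _ (ih b)

lemma goRun_eq_mkR (l : List Int) (s p : Int) :
    goRun s p l = mkR s (pairsF (p :: l)) ((p :: l).getLastD 0) := by
  induction l generalizing s p with
  | nil => simp [goRun, pairsF, mkR]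
  | cons y ys ih =>
    have hlast : (p :: y :: ys).getLastD 0 = (y :: ys).getLastD 0 := by
      cases ys <;> simp
    by_cases h : p = y - 1
    · have hfilter : pairsF (p :: y :: ys) = pairsF (y :: ys) := by
        simp [pairsF, show y = p + 1 by omega]
      rw [goRun, if_pos h, ih, hfilter, hlast]
    · have hfilter : pairsF (p :: y :: ys) = (p, y) :: pairsF (y :: ys) := by
        simp [pairsF, show ¬ (y = p + 1) by omega]
      rw [goRun, if_neg h, hfilter, hlast, mkR, ih]

lemma pyGet_neg_one_cons (h : Int) (t : List Int) :
    (PySem.List.pyGet? (h :: t) (-1)).getD 0 = (h :: t).getLastD 0 := by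
  simp [pysem, List.getLast?_eq_getElem?]

-- ===== VERDICT (by name: the statement is the Claim_ definition above) =====
theorem get_ranges_spec : Claim_equal_get_ranges := by
  intro indexes _
  unfold Spec_get_ranges get_ranges get_ranges_alt
  simp only [List.map_id']
  cases hl : PySem.List.sorted indexes (fun x => x) false with
  | nil => simp
  | cons h t =>
    simp only [List.foldl_cons]
    have hstep : aStep (([] : List (List Int)), none, none) h = ([], some h, some h) := by
      simp [aStep]
    rw [hstep, aFold_eq_goRun, goRun_eq_mkR]
    have hslice : PySem.List.slice (h :: t) (some 1) none = t := by
      simp [pysem]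
    have hget0 : (PySem.List.pyGet? (h :: t) 0).getD 0 = h := by
      simp [pysem]
    rw [List.nil_append, if_neg (by simp), hslice, pyGet_neg_one_cons, hget0]
    have := zip_mkR h (pairsF (h :: t)) ((h :: t).getLastD 0)
    simp only [pairsF, List.tail_cons] at this
    simp only [List.singleton_append]
    exact this.symm
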